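-- pv_equiv track=rewrite | github.com/IrijahMaxim/CryingSense | iot/firmware/feature_extraction.py | _calculate_envelope
-- ===== SOURCE A (Python) =====
-- def _calculate_envelope(samples, window_size=256):
--     """Calculate temporal envelope."""
--     envelope = []
--
--     for i in range(0, len(samples), window_size):
--         window = samples[i:i + window_size]
--         if window:
--             envelope_value = max(abs(s) for s in window)
--             envelope.append(envelope_value)
--
--     return envelope
-- ===== SOURCE B (Python) =====
-- def _calculate_envelope(samples, window_size=256):
--     """Streaming single pass: running max of abs per window, no slice objects."""
--     if window_size <= 0:
--         return []
--     envelope = []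
--     cur = 0
--     count = 0
--     for s in samples:
--         if count == window_size:
--             envelope.append(cur)
--             cur = 0
--             count = 0
--         a = -s if s < 0 else s
--         if a > cur:
--             cur = a
--         count += 1
--     if count:
--         envelope.append(cur)
--     return envelope
-- ===== Notes on version B (the rewrite author's own statement) =====
-- stated objective: alternative
-- what changed: Replaced the slice-per-window loop (index range with stride, window slice, max over a generator) by a streaming single pass over the samples that maintains a running per-window maximum and an element counter, flushing on window boundaries and once at the end for the trailing partial window.
import Mathlib
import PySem

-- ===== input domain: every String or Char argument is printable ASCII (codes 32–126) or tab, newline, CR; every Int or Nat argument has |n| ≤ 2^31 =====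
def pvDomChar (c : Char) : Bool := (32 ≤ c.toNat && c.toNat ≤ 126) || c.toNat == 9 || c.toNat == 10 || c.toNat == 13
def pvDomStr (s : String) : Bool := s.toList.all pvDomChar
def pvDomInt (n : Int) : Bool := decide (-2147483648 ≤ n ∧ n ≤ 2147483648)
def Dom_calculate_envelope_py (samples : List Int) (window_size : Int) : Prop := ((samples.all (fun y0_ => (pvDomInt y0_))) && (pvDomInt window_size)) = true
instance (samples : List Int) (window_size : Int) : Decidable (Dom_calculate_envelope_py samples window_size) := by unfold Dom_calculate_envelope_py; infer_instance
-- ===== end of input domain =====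

-- B replaces A's slice-per-window loop by a streaming single pass with a running max and a
-- counter (objective: alternative decomposition, same O(n) cost).

-- ===== PORT A =====
def pvPyMaxAbs (window : List Int) : Int :=
  match window with
  | [] => 0
  | x :: xs => xs.foldl (fun m s => max m |s|) |x|

def pvStepA (samples : List Int) (window_size : Int) (envelope : List Int) (i : Int) : List Int :=
  let window := PySem.List.slice samples (some i) (some (i + window_size))
  if window ≠ [] then envelope ++ [pvPyMaxAbs window] else envelope

def calculate_envelope_py (samples : List Int) (window_size : Int) : List Int :=
  (PySem.List.pyRange 0 samples.length window_size).foldl (pvStepA samples window_size) []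

def pvStepB (window_size : Int) (st : List Int × Int × Int) (s : Int) : List Int × Int × Int :=
  let (envelope, cur, count) :=
    if st.2.2 == window_size then (st.1 ++ [st.2.1], (0 : Int), (0 : Int)) else st
  let a := if s < 0 then -s else s
  let cur := if a > cur then a else cur
  (envelope, cur, count + 1)

def calculate_envelope_py_alt (samples : List Int) (window_size : Int) : List Int :=
  if window_size ≤ 0 then []
  else
    let st := samples.foldl (pvStepB window_size) ([], 0, 0)
    if st.2.2 ≠ 0 then st.1 ++ [st.2.1] else st.1


-- ===== PRECONDITION & SPEC =====
-- Pre_ excludes exactly window_size = 0, on which A raises ValueError (range() with zero step).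
def Pre_calculate_envelope_py (samples : List Int) (window_size : Int) : Prop := window_size ≠ 0
instance (samples : List Int) (window_size : Int) : Decidable (Pre_calculate_envelope_py samples window_size) := by unfold Pre_calculate_envelope_py; infer_instance
def pvWitness_calculate_envelope_py : List Int × Int := ([3, -7, 2, 5, -1], 2)

def Spec_calculate_envelope_py (samples : List Int) (window_size : Int) (out : List Int) : Prop := out = calculate_envelope_py_alt samples window_size
instance (samples : List Int) (window_size : Int) (out : List Int) : Decidable (Spec_calculate_envelope_py samples window_size out) := by unfold Spec_calculate_envelope_py; infer_instance

-- ===== CLAIM (what is proved, stated in full; the proofs are below) =====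
def Claim_equal_calculate_envelope_py : Prop := ∀ (samples : List Int) (window_size : Int), Dom_calculate_envelope_py samples window_size → Pre_calculate_envelope_py samples window_size → Spec_calculate_envelope_py samples window_size (calculate_envelope_py samples window_size)

-- ===== LEMMAS AND PROOFS =====
-- the common specification: maxima of |·| over successive windows of size w'+1
def pvMaxAbsF (init : Int) (xs : List Int) : Int := xs.foldl (fun m s => max m |s|) init

def pvSpec (w' : Nat) : List Int → List Int
  | [] => []
  | x :: xs => pvMaxAbsF |x| (xs.take w') :: pvSpec w' (xs.drop w')
termination_by xs => xs.length
decreasing_by simp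

theorem pvSpec_nil (w' : Nat) : pvSpec w' [] = [] := by rw [pvSpec]

theorem pvSpec_cons (w' : Nat) (x : Int) (xs : List Int) :
    pvSpec w' (x :: xs) = pvMaxAbsF |x| (xs.take w') :: pvSpec w' (xs.drop w') := by
  rw [pvSpec]

theorem pvPyRange_pos_nil (a b s : Int) (hs : 0 < s) (hba : b ≤ a) :
    PySem.List.pyRange a b s = [] := by
  rw [PySem.List.pyRange_of_pos a b hs]
  simp [if_neg (by omega : ¬ a < b)]

theorem pvPyRange_neg_nil (a b s : Int) (hs : s < 0) (hab : a ≤ b) :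
    PySem.List.pyRange a b s = [] := by
  simp [PySem.List.pyRange, if_neg (by omega : ¬ 0 < s), if_neg (by omega : ¬ b < a)]

theorem pvPyRange_pos_cons (a b s : Int) (hs : 0 < s) (hab : a < b) :
    PySem.List.pyRange a b s = a :: PySem.List.pyRange (a + s) b s := by
  rw [PySem.List.pyRange_of_pos a b hs, PySem.List.pyRange_of_pos (a + s) b hs]
  have hdiv : (b - a + s - 1) / s = (b - (a + s) + s - 1) / s + 1 := by
    have h : b - a + s - 1 = (b - (a + s) + s - 1) + 1 * s := by ring
    rw [h, Int.add_mul_ediv_right _ _ (by omega : s ≠ 0)]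
  have hz : ¬ a + s < b → (b - (a + s) + s - 1) / s = 0 := fun h2 => by
    apply Int.ediv_eq_zero_of_lt <;> omega
  rw [if_pos hab]
  by_cases h2 : a + s < b
  · have hnn : 0 ≤ (b - (a + s) + s - 1) / s := Int.ediv_nonneg (by omega) (by omega)
    rw [if_pos h2, hdiv,
      show ((b - (a + s) + s - 1) / s + 1).toNat = ((b - (a + s) + s - 1) / s).toNat + 1 by omega,
      List.range_succ_eq_map]
    simp only [List.map_cons, List.map_map, Nat.cast_zero, mul_zero, add_zero]
    congr 1
    apply List.map_congr_left
    intro k _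
    simp only [Function.comp_apply]
    push_cast
    ring
  · rw [if_neg h2, hdiv, hz h2]
    norm_num

theorem pvFoldA (w : Int) (hw : 0 < w) :
    ∀ (m : Nat) (samples : List Int) (a : Nat) (env : List Int),
      samples.length - a ≤ m →
      (PySem.List.pyRange (a : Int) (samples.length : Int) w).foldl (pvStepA samples w) env
      = env ++ pvSpec (w.toNat - 1) (samples.drop a) := by
  intro m
  induction m with
  | zero =>
    intro samples a env h
    rw [pvPyRange_pos_nil _ _ _ hw (by exact_mod_cast (by omega : samples.length ≤ a)),
      List.drop_eq_nil_of_le (by omega), pvSpec_nil]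
    simp
  | succ m ih =>
    intro samples a env h
    by_cases hla : samples.length ≤ a
    · rw [pvPyRange_pos_nil _ _ _ hw (by exact_mod_cast hla),
        List.drop_eq_nil_of_le hla, pvSpec_nil]
      simp
    · push_neg at hla
      obtain ⟨x, rest, hx⟩ : ∃ x rest, samples.drop a = x :: rest := by
        rcases hd : samples.drop a with _ | ⟨x, rest⟩
        · exact absurd (List.drop_eq_nil_iff.mp hd) (by omega)
        · exact ⟨x, rest, rfl⟩
      have htake : (x :: rest).take w.toNat = x :: rest.take (w.toNat - 1) := by
        rw [show w.toNat = (w.toNat - 1) + 1 by omega, List.take_succ_cons]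
        simp
      have hcast : (a : Int) + w = ((a + w.toNat : Nat) : Int) := by push_cast; omega
      have hwin : PySem.List.slice samples (some (a : Int)) (some ((a : Int) + w))
          = x :: rest.take (w.toNat - 1) := by
        rw [hcast, PySem.List.slice_natCast,
          show a + w.toNat - a = w.toNat by omega, hx, htake]
      have hstep : pvStepA samples w env (a : Int) = env ++ [pvPyMaxAbs (x :: rest.take (w.toNat - 1))] := by
        rw [pvStepA, hwin]
        simp
      rw [pvPyRange_pos_cons _ _ _ hw (by exact_mod_cast hla), List.foldl_cons, hstep,
        hcast, ih samples (a + w.toNat) _ (by omega)]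
      have hdrop : samples.drop (a + w.toNat) = rest.drop (w.toNat - 1) := by
        have h1 : List.drop w.toNat (List.drop a samples) = List.drop (a + w.toNat) samples :=
          List.drop_drop
        rw [← h1, hx, show w.toNat = (w.toNat - 1) + 1 by omega, List.drop_succ_cons]
        simp
      rw [hdrop, hx, pvSpec_cons]
      simp [pvPyMaxAbs, pvMaxAbsF]

theorem pvA_eq_spec (samples : List Int) (w : Int) (hw : 0 < w) :
    calculate_envelope_py samples w = pvSpec (w.toNat - 1) samples := by
  have := pvFoldA w hw samples.length samples 0 [] (by omega)
  simpa using this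

theorem pvAbsIf (s : Int) : (if s < 0 then -s else s) = |s| := by
  split_ifs with h
  · rw [abs_of_neg h]
  · rw [abs_of_nonneg (by omega)]

theorem pvMaxIf (c a : Int) : (if a > c then a else c) = max c a := by
  rw [max_def]; split_ifs <;> omega

theorem pvFoldB (w : Int) (hw : 0 < w) :
    ∀ (xs : List Int) (env : List Int) (cur count : Int),
      1 ≤ count → count ≤ w →
      (let st := xs.foldl (pvStepB w) (env, cur, count);
       if st.2.2 ≠ 0 then st.1 ++ [st.2.1] else st.1)
      = env ++ (pvMaxAbsF cur (xs.take (w - count).toNat)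
                 :: pvSpec (w.toNat - 1) (xs.drop (w - count).toNat)) := by
  intro xs
  induction xs with
  | nil =>
    intro env cur count h1 h2
    simp [List.foldl_nil, show ¬ count = 0 by omega, pvSpec_nil, pvMaxAbsF]
  | cons s xs ih =>
    intro env cur count h1 h2
    by_cases hc : count = w
    · have hstep : pvStepB w (env, cur, count) s = (env ++ [cur], |s|, 1) := by
        simp only [pvStepB, hc, beq_self_eq_true, if_pos, pvAbsIf, pvMaxIf]
        simp [abs_nonneg]
      rw [List.foldl_cons, hstep, ih (env ++ [cur]) |s| 1 (by omega) (by omega),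
        show (w - 1).toNat = w.toNat - 1 by omega,
        show (w - count).toNat = 0 by omega, List.take_zero, List.drop_zero,
        pvSpec_cons]
      simp [pvMaxAbsF]
    · have hstep : pvStepB w (env, cur, count) s = (env, max cur |s|, count + 1) := by
        simp only [pvStepB, pvAbsIf, pvMaxIf]
        rw [if_neg (by simp [hc])]
      rw [List.foldl_cons, hstep, ih env (max cur |s|) (count + 1) (by omega) (by omega)]
      have htake : (s :: xs).take (w - count).toNat
          = s :: xs.take (w - (count + 1)).toNat := by
        rw [show (w - count).toNat = (w - (count + 1)).toNat + 1 by omega, List.take_succ_cons]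
      have hdrop : (s :: xs).drop (w - count).toNat
          = xs.drop (w - (count + 1)).toNat := by
        rw [show (w - count).toNat = (w - (count + 1)).toNat + 1 by omega, List.drop_succ_cons]
      rw [htake, hdrop]
      simp [pvMaxAbsF]

theorem pvB_eq_spec (samples : List Int) (w : Int) (hw : 0 < w) :
    calculate_envelope_py_alt samples w = pvSpec (w.toNat - 1) samples := by
  rw [calculate_envelope_py_alt, if_neg (by omega : ¬ w ≤ 0)]
  rcases samples with _ | ⟨y, ys⟩
  · simp [pvSpec_nil]
  · have hstep : pvStepB w (([] : List Int), (0 : Int), (0 : Int)) y = ([], |y|, 1) := by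
      simp only [pvStepB, pvAbsIf, pvMaxIf]
      rw [if_neg (by simp; omega)]
      simp [abs_nonneg]
    simp only [List.foldl_cons, hstep]
    have := pvFoldB w hw ys [] |y| 1 (by omega) (by omega)
    simp only at this
    rw [this, pvSpec_cons]
    simp [pvMaxAbsF, show (w - 1).toNat = w.toNat - 1 by omega]

theorem pvMain (samples : List Int) (w : Int) (hw : w ≠ 0) :
    calculate_envelope_py samples w = calculate_envelope_py_alt samples w := by
  rcases lt_or_gt_of_ne hw with hneg | hpos
  · rw [calculate_envelope_py, pvPyRange_neg_nil _ _ _ hneg (by positivity),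
      calculate_envelope_py_alt, if_pos (by omega)]
    rfl
  · rw [pvA_eq_spec _ _ hpos, pvB_eq_spec _ _ hpos]

-- ===== VERDICT (by name: the statement is the Claim_ definition above) =====
theorem calculate_envelope_py_spec : Claim_equal_calculate_envelope_py := by
  intro samples window_size _ hpre
  unfold Spec_calculate_envelope_py
  exact pvMain samples window_size hpre
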